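-- pv_equiv track=rewrite | github.com/dailerob/turing_machine_testing | turing_machine.py | tape_to_string
-- ===== SOURCE A (Python) =====
-- def tape_to_string(tape, blank_symbol=' '):
--     """
--     Convert a tape dictionary back to a readable string.
--
--     Args:
--         tape: Dict mapping positions to symbols
--         blank_symbol: Symbol to use for gaps (default: ' ')
--
--     Returns:
--         String representation of the tape from min to max position
--     """
--     if not tape:
--         return ""
--
--     min_pos = min(tape.keys())
--     max_pos = max(tape.keys())
--
--     result = []
--     for pos in range(min_pos, max_pos + 1):
--         symbol = tape.get(pos, blank_symbol)
--         result.append(str(symbol))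
--
--     return ''.join(result)
-- ===== SOURCE B (Python) =====
-- def tape_to_string(tape, blank_symbol=' '):
--     """Walk the sorted sparse entries, filling blank-runs between consecutive keys."""
--     items = sorted(tape.items(), key=lambda kv: kv[0])
--     parts = []
--     prev = None
--     for pos, sym in items:
--         if prev is not None:
--             parts.append(str(blank_symbol) * (pos - prev - 1))
--         parts.append(str(sym))
--         prev = pos
--     return ''.join(parts)
-- ===== Notes on version B (the rewrite author's own statement) =====
-- stated objective: alternative
-- what changed: B sorts the dict's items once and reconstructs the blank runs between consecutive keys, instead of scanning every position from min to max with a dict.get per position.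
import Mathlib
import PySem

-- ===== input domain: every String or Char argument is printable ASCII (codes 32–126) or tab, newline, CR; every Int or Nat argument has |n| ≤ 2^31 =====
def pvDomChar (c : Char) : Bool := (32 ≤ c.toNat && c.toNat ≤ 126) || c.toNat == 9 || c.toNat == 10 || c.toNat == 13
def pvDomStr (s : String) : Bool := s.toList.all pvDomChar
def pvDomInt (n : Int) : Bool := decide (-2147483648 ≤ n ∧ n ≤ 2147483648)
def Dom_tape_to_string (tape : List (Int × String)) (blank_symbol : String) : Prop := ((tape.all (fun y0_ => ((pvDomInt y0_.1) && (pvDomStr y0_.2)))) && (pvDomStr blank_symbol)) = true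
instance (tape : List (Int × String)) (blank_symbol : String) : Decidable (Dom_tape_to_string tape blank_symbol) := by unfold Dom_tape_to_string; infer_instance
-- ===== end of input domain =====

-- B sorts the dict's items once and fills the blank run between consecutive keys,
-- instead of scanning every position from min to max with a per-position dict lookup
-- (a different decomposition of the same task; no speed claim made).

-- ===== PORT A =====
def tape_to_string (tape : List (Int × String)) (blank_symbol : String) : String :=
  let d := PySem.Dict.ofList tape
  if d.items.isEmpty then ""
  else
    match PySem.List.min? d.keys (fun k => k), PySem.List.max? d.keys (fun k => k) with
    | some min_pos, some max_pos =>
      -- for pos in range(min_pos, max_pos + 1): result.append(str(tape.get(pos, blank_symbol)))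
      let result := (PySem.List.pyRange min_pos (max_pos + 1)).foldl
        (fun acc pos => acc ++ [d.getD pos blank_symbol]) []
      PySem.Str.join "" result
    | _, _ => ""  -- unreachable: a non-empty dict has keys

-- ===== PORT B =====
def tape_to_string_alt (tape : List (Int × String)) (blank_symbol : String) : String :=
  let d := PySem.Dict.ofList tape
  let items := PySem.List.sorted d.items (fun kv => kv.1) false
  -- for pos, sym in items: gap fill (if prev is not None), append str(sym), prev = pos
  let st := items.foldl
    (fun (st : List String × Option Int) kv =>
      match st.2 with
      | some prev =>
        (st.1 ++ [String.ofList (PySem.List.pyRepeat blank_symbol.toList (kv.1 - prev - 1)), kv.2], some kv.1)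
      | none => (st.1 ++ [kv.2], some kv.1))
    ([], none)
  PySem.Str.join "" st.1

-- ===== PRECONDITION & SPEC =====
def Spec_tape_to_string (tape : List (Int × String)) (blank_symbol : String) (out : String) : Prop := out = tape_to_string_alt tape blank_symbol
instance (tape : List (Int × String)) (blank_symbol : String) (out : String) : Decidable (Spec_tape_to_string tape blank_symbol out) := by unfold Spec_tape_to_string; infer_instance

-- ===== CLAIM (what is proved, stated in full; the proofs are below) =====
def Claim_equal_tape_to_string : Prop := ∀ (tape : List (Int × String)) (blank_symbol : String), Dom_tape_to_string tape blank_symbol → Spec_tape_to_string tape blank_symbol (tape_to_string tape blank_symbol)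

-- ===== LEMMAS AND PROOFS =====

-- last key of the (sorted) entry list, defaulting to `a`
def pvLastKey (l : List (Int × String)) (a : Int) : Int := l.foldl (fun _ p => p.1) a

-- the parts list B's loop produces after its first iteration, starting from previous key `prev`
def pvGapParts (blank : String) : Int → List (Int × String) → List String
  | _, [] => []
  | prev, kv :: t =>
      String.ofList (PySem.List.pyRepeat blank.toList (kv.1 - prev - 1)) :: kv.2 :: pvGapParts blank kv.1 t

theorem pvLastKey_cons (p : Int × String) (t : List (Int × String)) (a : Int) :
    pvLastKey (p :: t) a = pvLastKey t p.1 := rfl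

theorem pvLe_lastKey : ∀ (t : List (Int × String)) (a : Int),
    (∀ p ∈ t, a ≤ p.1) → t.Pairwise (fun p q => p.1 < q.1) → a ≤ pvLastKey t a := by
  intro t
  induction t with
  | nil => intro a _ _; exact le_refl a
  | cons kv t ih =>
    intro a hlo hp
    rw [pvLastKey_cons]
    have h1 := (List.pairwise_cons.mp hp).1
    have h2 := (List.pairwise_cons.mp hp).2
    have := ih kv.1 (fun p hp' => le_of_lt (h1 p hp')) h2
    have := hlo kv (List.mem_cons_self ..)
    omega

theorem pvKeys_le_lastKey : ∀ (l : List (Int × String)) (a : Int),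
    l.Pairwise (fun p q => p.1 < q.1) → ∀ p ∈ l, p.1 ≤ pvLastKey l a := by
  intro l
  induction l with
  | nil => intro a _ p hp; cases hp
  | cons kv t ih =>
    intro a hp p hmem
    rw [pvLastKey_cons]
    have h1 := (List.pairwise_cons.mp hp).1
    have h2 := (List.pairwise_cons.mp hp).2
    rcases List.mem_cons.mp hmem with h | h
    · subst h; exact pvLe_lastKey t p.1 (fun q hq => le_of_lt (h1 q hq)) h2
    · exact ih kv.1 h2 p h

theorem pvLastKey_mem : ∀ (l : List (Int × String)) (a : Int), l ≠ [] →
    ∃ p ∈ l, pvLastKey l a = p.1 := by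
  intro l
  induction l with
  | nil => intro a h; exact absurd rfl h
  | cons kv t ih =>
    intro a _
    rw [pvLastKey_cons]
    rcases eq_or_ne t [] with h | h
    · subst h; exact ⟨kv, List.mem_cons_self .., rfl⟩
    · obtain ⟨p, hp, he⟩ := ih kv.1 h
      exact ⟨p, List.mem_cons_of_mem _ hp, he⟩

theorem pvJoin_nil_eq_flatten : ∀ (css : List (List Char)), PySem.Chars.join [] css = css.flatten := by
  intro css
  induction css with
  | nil => simp [PySem.Chars.join_nil]
  | cons cs css ih =>
    cases css with
    | nil => simp [PySem.Chars.join_singleton]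
    | cons cs' css' =>
      rw [PySem.Chars.join_cons_cons, List.flatten_cons, ih]
      simp

theorem pvFoldl_snoc {α β : Type} (g : α → β) : ∀ (xs : List α) (acc : List β),
    xs.foldl (fun a x => a ++ [g x]) acc = acc ++ xs.map g := by
  intro xs
  induction xs with
  | nil => intro acc; simp
  | cons x xs ih => intro acc; simp [ih]

-- the central lemma: the min-to-max scan of A over the suffix l of the sorted items,
-- resumed after previous key `prev`, produces exactly B's gap-filled parts
theorem pvSeg (blank : String) (d : PySem.Dict Int String) (hnd : d.keys.Nodup) :
    ∀ (l : List (Int × String)) (prev : Int),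
      l.Pairwise (fun p q => p.1 < q.1) →
      (∀ p ∈ l, prev < p.1) →
      (∀ p ∈ l, p ∈ d.items) →
      (∀ k ∈ d.keys, prev < k → k ∈ l.map Prod.fst) →
      ((PySem.List.pyRange (prev + 1) (pvLastKey l prev + 1)).map
          (fun pos => (d.getD pos blank).toList)).flatten
        = ((pvGapParts blank prev l).map String.toList).flatten := by
  intro l
  induction l with
  | nil =>
    intro prev _ _ _ _
    rw [show pvLastKey [] prev = prev from rfl,
        PySem.List.pyRange_one_eq_nil (by omega)]
    simp [pvGapParts]
  | cons kv t ih =>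
    intro prev hpair hlo hitems hkeys
    have hk : prev < kv.1 := hlo kv (List.mem_cons_self ..)
    have hkt : ∀ p ∈ t, kv.1 < p.1 := (List.pairwise_cons.mp hpair).1
    have hpt : t.Pairwise (fun p q => p.1 < q.1) := (List.pairwise_cons.mp hpair).2
    have hL : kv.1 ≤ pvLastKey t kv.1 :=
      pvLe_lastKey t kv.1 (fun p hp => le_of_lt (hkt p hp)) hpt
    rw [pvLastKey_cons,
        PySem.List.pyRange_one_append (prev + 1) kv.1 (pvLastKey t kv.1 + 1)
          (by omega) (by omega),
        PySem.List.pyRange_one_cons (show kv.1 < pvLastKey t kv.1 + 1 by omega)]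
    -- the scanned positions strictly between prev and kv.1 hold no key: each yields blank
    have hblank : ∀ pos ∈ PySem.List.pyRange (prev + 1) kv.1, d.getD pos blank = blank := by
      intro pos hpos
      rw [PySem.List.mem_pyRange_one] at hpos
      apply PySem.Dict.getD_of_not_contains
      have hnk : pos ∉ d.keys := by
        intro hmem
        have := hkeys pos hmem (by omega)
        simp only [List.map_cons, List.mem_cons, List.mem_map] at this
        rcases this with h | ⟨q, hq, hq1⟩
        · omega
        · have := hkt q hq; omega
      cases hc : d.contains pos with
      | false => rfl
      | true => exact absurd ((PySem.Dict.contains_iff_mem_keys d pos).mp hc) hnk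
    have hrun : (PySem.List.pyRange (prev + 1) kv.1).map
        (fun pos => (d.getD pos blank).toList)
        = List.replicate (kv.1 - (prev + 1)).toNat blank.toList := by
      rw [List.map_congr_left (fun pos hpos => by rw [hblank pos hpos] :
            ∀ pos ∈ PySem.List.pyRange (prev + 1) kv.1,
              (d.getD pos blank).toList = blank.toList)]
      rw [List.map_const', PySem.List.length_pyRange_one]
    have hhit : d.getD kv.1 blank = kv.2 :=
      PySem.Dict.getD_of_mem_items d (hitems kv (List.mem_cons_self ..)) hnd blank
    have htail := ih kv.1 hpt hkt (fun p hp => hitems p (List.mem_cons_of_mem _ hp))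
      (by
        intro k hkmem hklt
        have := hkeys k hkmem (by omega)
        simp only [List.map_cons, List.mem_cons] at this ⊢
        rcases this with h | h
        · omega
        · exact h)
    simp only [List.map_append, List.map_cons, List.flatten_append, List.flatten_cons,
      hrun, hhit, htail, pvGapParts, String.toList_ofList, PySem.List.pyRepeat]
    rw [show kv.1 - prev - 1 = kv.1 - (prev + 1) from by ring]

-- B's loop, once started (prev = some k), appends exactly the gap-filled parts
theorem pvFoldl_gap (blank : String) :
    ∀ (t : List (Int × String)) (parts : List String) (k : Int),
      t.foldl
        (fun (st : List String × Option Int) kv =>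
          match st.2 with
          | some prev =>
            (st.1 ++ [String.ofList (PySem.List.pyRepeat blank.toList (kv.1 - prev - 1)), kv.2], some kv.1)
          | none => (st.1 ++ [kv.2], some kv.1))
        (parts, some k)
      = (parts ++ pvGapParts blank k t, some (pvLastKey t k)) := by
  intro t
  induction t with
  | nil => intro parts k; simp [pvGapParts, pvLastKey]
  | cons kv t ih =>
    intro parts k
    rw [List.foldl_cons]
    show t.foldl _ (parts ++ [_, kv.2], some kv.1) = _
    rw [ih, pvLastKey_cons, pvGapParts]
    simp

theorem pvFoldl_start (blank : String) (hd1 : Int × String) (tl : List (Int × String)) :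
    (hd1 :: tl).foldl
        (fun (st : List String × Option Int) kv =>
          match st.2 with
          | some prev =>
            (st.1 ++ [String.ofList (PySem.List.pyRepeat blank.toList (kv.1 - prev - 1)), kv.2], some kv.1)
          | none => (st.1 ++ [kv.2], some kv.1))
        ([], none)
      = (hd1.2 :: pvGapParts blank hd1.1 tl, some (pvLastKey tl hd1.1)) := by
  rw [List.foldl_cons]
  exact pvFoldl_gap blank tl [hd1.2] hd1.1

theorem tape_to_string_spec : Claim_equal_tape_to_string := by
  intro tape blank _
  unfold Spec_tape_to_string tape_to_string tape_to_string_alt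
  set d := PySem.Dict.ofList tape with hd
  have hnd : d.keys.Nodup := PySem.Dict.nodup_keys_ofList tape
  by_cases hE : d.items.isEmpty
  · have h0 : d.items = [] := List.isEmpty_iff.mp hE
    have hsl : PySem.List.sorted d.items (fun kv => kv.1) false = [] :=
      (PySem.List.sorted_eq_nil_iff d.items (fun kv => kv.1) false).mpr h0
    simp [hE, hsl]
    rfl
  · have hne : d.items ≠ [] := fun h => hE (by simp [h])
    set l := PySem.List.sorted d.items (fun kv => kv.1) false with hldef
    have hlne : l ≠ [] := fun h => hne ((PySem.List.sorted_eq_nil_iff _ _ _).mp h)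
    obtain ⟨hd1, tl, hl⟩ := List.exists_cons_of_ne_nil hlne
    have hperm : l.Perm d.items := PySem.List.sorted_perm d.items (fun kv => kv.1) false
    have hkeys : d.keys = d.items.map Prod.fst := by
      simp only [PySem.Dict.keys]
    have hkne : d.keys ≠ [] := by
      rw [hkeys]; simpa using hne
    -- keys of l, strict sortedness
    have hpermk : (l.map Prod.fst).Perm d.keys := by
      rw [hkeys]; exact hperm.map Prod.fst
    have hndl : (l.map Prod.fst).Nodup := (hpermk.nodup_iff).mpr hnd
    have hpair : l.Pairwise (fun p q => p.1 < q.1) := by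
      have h1 : l.Pairwise (fun p q => p.1 ≤ q.1) :=
        PySem.List.sorted_pairwise d.items (fun kv => kv.1)
      have h2 : l.Pairwise (fun p q => p.1 ≠ q.1) := List.pairwise_map.mp hndl
      exact (h1.and h2).imp (fun h => lt_of_le_of_ne h.1 h.2)
    have hsortl : PySem.List.sorted d.items (fun kv => kv.1) false = hd1 :: tl := by
      rw [← hldef]; exact hl
    have hhead : ∀ y ∈ d.items, hd1.1 ≤ y.1 :=
      PySem.List.key_head_sorted_le d.items (fun kv => kv.1) hsortl
    -- min and max of the keys
    obtain ⟨mn, hmn⟩ : ∃ mn, PySem.List.min? d.keys (fun k => k) = some mn := by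
      cases h : PySem.List.min? d.keys (fun k => k) with
      | none => exact absurd ((PySem.List.min?_eq_none_iff _ _).mp h) hkne
      | some m => exact ⟨m, rfl⟩
    obtain ⟨mx, hmx⟩ : ∃ mx, PySem.List.max? d.keys (fun k => k) = some mx := by
      cases h : PySem.List.max? d.keys (fun k => k) with
      | none => exact absurd ((PySem.List.max?_eq_none_iff _ _).mp h) hkne
      | some m => exact ⟨m, rfl⟩
    have hmem_keys : ∀ p ∈ l, p.1 ∈ d.keys := by
      intro p hp
      rw [hkeys]
      exact List.mem_map_of_mem (hperm.subset hp)
    have hmneq : mn = hd1.1 := by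
      have h1 : mn ≤ hd1.1 :=
        PySem.List.min?_isMin hmn hd1.1 (hmem_keys hd1 (hl ▸ List.mem_cons_self ..))
      have h2 : hd1.1 ≤ mn := by
        have hmnk := PySem.List.min?_mem hmn
        rw [hkeys] at hmnk
        obtain ⟨y, hy, hye⟩ := List.mem_map.mp hmnk
        exact hye ▸ hhead y hy
      omega
    have hmxeq : mx = pvLastKey l (hd1.1 - 1) := by
      obtain ⟨p, hp, hpe⟩ := pvLastKey_mem l (hd1.1 - 1) hlne
      have h1 : pvLastKey l (hd1.1 - 1) ≤ mx :=
        hpe ▸ PySem.List.max?_isMax hmx p.1 (hmem_keys p hp)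
      have h2 : mx ≤ pvLastKey l (hd1.1 - 1) := by
        have hmxk := PySem.List.max?_mem hmx
        have : mx ∈ l.map Prod.fst := hpermk.mem_iff.mpr hmxk
        obtain ⟨q, hq, hqe⟩ := List.mem_map.mp this
        exact hqe ▸ pvKeys_le_lastKey l (hd1.1 - 1) hpair q hq
      omega
    -- evaluate both sides
    simp only [hE, Bool.false_eq_true, if_false, hmn, hmx]
    rw [← hldef, hl, pvFoldl_start blank hd1 tl]
    rw [pvFoldl_snoc (fun pos => d.getD pos blank) _ []]
    apply String.toList_inj.mp
    rw [PySem.Str.toList_join, PySem.Str.toList_join]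
    rw [show ("" : String).toList = [] from rfl]
    rw [pvJoin_nil_eq_flatten, pvJoin_nil_eq_flatten]
    have hseg := pvSeg blank d hnd l (hd1.1 - 1) hpair
      (by intro p hp; have := hhead p (hperm.subset hp); omega)
      (fun p hp => hperm.subset hp)
      (by
        intro k hk _
        rw [hkeys] at hk
        exact hpermk.mem_iff.mpr (hkeys ▸ hk))
    rw [hl] at hseg
    have h0 : hd1.1 - (hd1.1 - 1) - 1 = 0 := by ring
    rw [pvGapParts, h0] at hseg
    rw [show hd1.1 - 1 + 1 = hd1.1 by ring] at hseg
    simp only [hmneq, hmxeq, hl, List.nil_append, List.map_map, Function.comp_def, List.map_cons]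
    rw [hseg]
    simp [PySem.List.pyRepeat]
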